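-- pv_equiv track=rewrite | github.com/trz129/CNUHS-GA-Timetable-Scheduling-System | AP-scheduling-module.py | check_student_schedule
-- ===== SOURCE A (Python) =====
-- def check_student_schedule(courses, schedule, grade):
--     from itertools import combinations, permutations
--     if grade == 'G11':
--         allowed_time_slots = range(3)
--     else:
--         allowed_time_slots = range(len(schedule))
--     for time_slot_combination in combinations(allowed_time_slots, len(courses)):
--         for assignment in permutations(time_slot_combination):
--             conflict = False
--             used_slots = set()
--             for i, course in enumerate(courses):
--                 time_slot = assignment[i]
--                 if course in schedule[time_slot] and time_slot not in used_slots: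
--                     used_slots.add(time_slot)
--                 else:
--                     conflict = True
--                     break
--             if not conflict:
--                 return True
--     return False
-- ===== SOURCE B (Python) =====
-- def check_student_schedule(courses, schedule, grade):
--     # Pruned depth-first backtracking over slot choices (one course at a time),
--     # instead of exhaustively enumerating every combination and permutation.
--     slots = schedule[:3] if grade == 'G11' else schedule
--     n = len(slots)
--     if len(courses) > n:
--         return False  # pigeonhole: not enough distinct slots
--
--     def place(i, used):
--         if i == len(courses):
--             return True
--         c = courses[i]
--         for j in range(n):
--             if j not in used and c in slots[j] and place(i + 1, used | {j}):
--                 return True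
--         return False
--
--     return place(0, frozenset())
-- ===== Notes on version B (the rewrite author's own statement) =====
-- stated objective: alternative
-- what changed: A exhaustively enumerates every C(m,k) slot combination and all k! permutations of each, testing complete assignments; B does a pruned depth-first backtracking search that extends a partial course-to-slot assignment one course at a time (with a pigeonhole early exit), never materialising combinations or permutations.
-- outside the precondition, e.g. on check_student_schedule(['x'], [['a']], 'G11'): A raises IndexError, B returns False; on check_student_schedule(['a'], [['a']], 'G11'): A returns True, B returns True
import Mathlib
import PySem

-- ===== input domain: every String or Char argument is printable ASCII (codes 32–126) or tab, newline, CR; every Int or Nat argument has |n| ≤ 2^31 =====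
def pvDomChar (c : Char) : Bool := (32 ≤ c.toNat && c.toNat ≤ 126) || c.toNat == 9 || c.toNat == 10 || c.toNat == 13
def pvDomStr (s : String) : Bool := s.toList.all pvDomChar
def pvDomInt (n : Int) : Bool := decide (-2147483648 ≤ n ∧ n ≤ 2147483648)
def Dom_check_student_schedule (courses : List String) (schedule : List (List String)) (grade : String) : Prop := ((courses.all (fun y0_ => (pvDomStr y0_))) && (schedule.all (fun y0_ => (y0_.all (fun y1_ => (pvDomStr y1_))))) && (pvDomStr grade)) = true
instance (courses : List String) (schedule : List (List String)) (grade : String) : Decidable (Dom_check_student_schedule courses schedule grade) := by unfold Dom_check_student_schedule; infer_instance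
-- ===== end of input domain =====

-- B replaces A's exhaustive combination/permutation enumeration by a pruned depth-first
-- backtracking search over slot choices (same return value on all admitted inputs).


-- ===== PORT A =====
-- inner loop: 'for i, course in enumerate(courses): …'; assignment[i] is always in range
-- (len(assignment) = len(courses)), and schedule[time_slot] is in range on every input
-- admitted by Pre_, so both indexings are ported with pyGetD (exact there).
def aCheckLoop (schedule : List (List String)) (assignment : List Int) :
    List (Int × String) → PySem.Set Int → Bool
  | [], _ => true
  | (i, course) :: rest, used =>
    let t := PySem.List.pyGetD assignment i 0
    if (PySem.List.pyGetD schedule t []).contains course && !(PySem.Set.contains used t) then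
      aCheckLoop schedule assignment rest (PySem.Set.add used t)
    else
      false

def check_student_schedule (courses : List String) (schedule : List (List String)) (grade : String) : Bool :=
  let allowed : List Int :=
    if grade == "G11" then PySem.List.pyRange 0 3 1
    else PySem.List.pyRange 0 (schedule.length : Int) 1
  (PySem.List.combinations allowed courses.length).any fun combo =>
    (PySem.List.permutations combo combo.length).any fun assignment =>
      aCheckLoop schedule assignment (PySem.List.enumerate courses 0) PySem.Set.empty

-- ===== PORT B =====
-- 'def place(i, used): …' — recursion over the remaining courses; used : frozenset of slots
def bPlace (slots : List (List String)) : List String → PySem.Set Int → Bool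
  | [], _ => true
  | c :: rest, used =>
    (PySem.List.pyRange 0 (slots.length : Int) 1).any fun j =>
      !(PySem.Set.contains used j) && (PySem.List.pyGetD slots j []).contains c &&
        bPlace slots rest (PySem.Set.add used j)

def check_student_schedule_alt (courses : List String) (schedule : List (List String)) (grade : String) : Bool :=
  let slots := if grade == "G11" then PySem.List.slice schedule none (some 3) else schedule
  if courses.length > slots.length then false  -- pigeonhole: not enough distinct slots
  else bPlace slots courses PySem.Set.empty

-- ===== PRECONDITION & SPEC =====
-- Pre_ excludes the G11 inputs with fewer than 3 schedule slots and 1..3 courses: there A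
-- indexes schedule[t] for a hard-coded slot t < 3 that may not exist and raises IndexError
-- unless it finds a fitting assignment among the existing slots first; B truncates the
-- schedule naturally and returns the same value wherever A does return one.
def Pre_check_student_schedule (courses : List String) (schedule : List (List String)) (grade : String) : Prop :=
  ¬ (grade = "G11" ∧ schedule.length < 3 ∧ 1 ≤ courses.length ∧ courses.length ≤ 3)
instance (courses : List String) (schedule : List (List String)) (grade : String) : Decidable (Pre_check_student_schedule courses schedule grade) := by unfold Pre_check_student_schedule; infer_instance

def pvWitness_check_student_schedule : List String × List (List String) × String :=
  (["math"], [["math"], ["art"], ["sci"]], "G11")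

def Spec_check_student_schedule (courses : List String) (schedule : List (List String)) (grade : String) (out : Bool) : Prop := out = check_student_schedule_alt courses schedule grade
instance (courses : List String) (schedule : List (List String)) (grade : String) (out : Bool) : Decidable (Spec_check_student_schedule courses schedule grade out) := by unfold Spec_check_student_schedule; infer_instance

-- ===== CLAIM (what is proved, stated in full; the proofs are below) =====
def Claim_equal_check_student_schedule : Prop := ∀ (courses : List String) (schedule : List (List String)) (grade : String), Dom_check_student_schedule courses schedule grade → Pre_check_student_schedule courses schedule grade → Spec_check_student_schedule courses schedule grade (check_student_schedule courses schedule grade)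

-- ===== LEMMAS AND PROOFS =====

-- Common value-level spec: ts assigns to the courses pairwise-distinct slots in [0, bound),
-- each containing its course (looked up in `lookup`).
def Fits (cs : List String) (lookup : List (List String)) (bound : Int) (ts : List Int) : Prop :=
  ts.length = cs.length ∧ ts.Nodup ∧ (∀ x ∈ ts, 0 ≤ x ∧ x < bound) ∧
  ∀ p ∈ cs.zip ts, (PySem.List.pyGetD lookup p.2 []).contains p.1 = true

-- straightened form of A's inner loop (courses paired with their slots directly)
def chainOK (sched : List (List String)) : List String → List Int → PySem.Set Int → Bool
  | [], _, _ => true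
  | _ :: _, [], _ => true
  | c :: cs, t :: ts, used =>
    if (PySem.List.pyGetD sched t []).contains c && !(PySem.Set.contains used t) then
      chainOK sched cs ts (PySem.Set.add used t)
    else
      false

theorem contains_eq_false_iff {s : PySem.Set Int} {x : Int} :
    PySem.Set.contains s x = false ↔ x ∉ s := by
  rw [← Bool.not_eq_true, PySem.Set.contains_iff]

theorem aCheckLoop_eq_chainOK (sched : List (List String)) (asg : List Int) :
    ∀ (cs : List String) (i0 : Nat) (used : PySem.Set Int), i0 + cs.length ≤ asg.length →
    aCheckLoop sched asg (PySem.List.enumerate cs (i0 : Int)) used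
      = chainOK sched cs (asg.drop i0) used := by
  intro cs
  induction cs with
  | nil =>
    intro i0 used h
    simp [PySem.List.enumerate_nil, aCheckLoop]
    cases asg.drop i0 <;> simp [chainOK]
  | cons c cs ih =>
    intro i0 used h
    have hi0 : i0 < asg.length := by simp at h; omega
    rw [PySem.List.enumerate_cons]
    have hdrop : asg.drop i0 = asg[i0] :: asg.drop (i0 + 1) := List.drop_eq_getElem_cons hi0
    have hget : PySem.List.pyGetD asg (i0 : Int) 0 = asg[i0] := by
      rw [PySem.List.pyGetD_natCast]; exact List.getD_eq_getElem _ _ hi0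
    rw [hdrop]
    show aCheckLoop sched asg (((i0:Int), c) :: PySem.List.enumerate cs ((i0:Int)+1)) used = _
    simp only [aCheckLoop, chainOK, hget]
    split
    · have : ((i0 : Int) + 1) = ((i0 + 1 : Nat) : Int) := by push_cast; ring
      rw [this, ih (i0+1) _ (by simp at h ⊢; omega)]
    · rfl

theorem chainOK_iff (sched : List (List String)) :
    ∀ (cs : List String) (ts : List Int) (used : PySem.Set Int), cs.length = ts.length →
    (chainOK sched cs ts used = true ↔
      ts.Nodup ∧ (∀ x ∈ ts, PySem.Set.contains used x = false) ∧
      ∀ p ∈ cs.zip ts, (PySem.List.pyGetD sched p.2 []).contains p.1 = true) := by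
  intro cs
  induction cs with
  | nil =>
    intro ts used h
    have : ts = [] := by cases ts <;> simp_all
    subst this; simp [chainOK]
  | cons c cs ih =>
    intro ts used h
    cases ts with
    | nil => simp at h
    | cons t ts' =>
      simp only [chainOK]
      constructor
      · intro hrun
        split at hrun
        · rename_i hcond
          simp only [Bool.and_eq_true, Bool.not_eq_true'] at hcond
          obtain ⟨hmem, hused⟩ := hcond
          obtain ⟨hnd, havoid, hzip⟩ := (ih ts' (PySem.Set.add used t) (by simpa using h)).1 hrun
          refine ⟨?_, ?_, ?_⟩
          · refine List.nodup_cons.2 ⟨fun hmem' => ?_, hnd⟩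
            have := havoid t hmem'
            rw [contains_eq_false_iff, PySem.Set.mem_add] at this
            exact this (Or.inr rfl)
          · intro x hx
            rcases hx with _ | hx
            · exact hused
            · have := havoid x (by assumption)
              rw [contains_eq_false_iff, PySem.Set.mem_add] at this
              rw [contains_eq_false_iff]
              exact fun hc => this (Or.inl hc)
          · intro p hp
            rcases hp with _ | hp
            · exact hmem
            · exact hzip p (by assumption)
        · simp at hrun
      · rintro ⟨hnd, havoid, hzip⟩
        have hnd' := List.nodup_cons.1 hnd
        have hcond : (PySem.List.pyGetD sched t []).contains c = true ∧
            PySem.Set.contains used t = false :=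
          ⟨hzip (c, t) (by simp), havoid t (by simp)⟩
        rw [hcond.1, hcond.2]
        simp only [Bool.not_false, Bool.and_self, if_true]
        refine (ih ts' (PySem.Set.add used t) (by simpa using h)).2 ⟨hnd'.2, ?_, ?_⟩
        · intro x hx
          rw [contains_eq_false_iff, PySem.Set.mem_add]
          rintro (hc | rfl)
          · exact (contains_eq_false_iff.1 (havoid x (by simp [hx]))) hc
          · exact hnd'.1 hx
        · intro p hp
          exact hzip p (by simp [hp])

-- converse of PySem.List.perm_of_mem_permutations (stated for Int, the only use here)
theorem mem_permutations_of_perm :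
    ∀ {p xs : List Int}, p.Perm xs → p ∈ PySem.List.permutations xs xs.length := by
  intro p
  induction p with
  | nil =>
    intro xs h
    have : xs = [] := h.symm.eq_nil
    subst this
    simp [PySem.List.permutations_zero]
  | cons a q ih =>
    intro xs h
    have ha : a ∈ xs := h.mem_iff.1 (by simp)
    have hq : q.Perm (xs.erase a) := (List.cons_perm_iff_perm_erase.1 h).2
    have hlen : xs.length = q.length + 1 := by
      have := h.length_eq; simpa using this.symm
    rw [hlen, PySem.List.permutations_succ]
    rw [List.mem_flatMap]
    refine ⟨xs.idxOf a, by simp [List.idxOf_lt_length_iff.2 ha], ?_⟩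
    have hget : xs[xs.idxOf a]? = some a := by
      rw [List.getElem?_eq_getElem (List.idxOf_lt_length_iff.2 ha)]
      simp [List.getElem_idxOf]
    rw [hget]
    simp only [List.mem_map]
    refine ⟨q, ?_, rfl⟩
    have herase : xs.eraseIdx (xs.idxOf a) = xs.erase a :=
      (List.erase_eq_eraseIdx_of_idxOf rfl).symm
    rw [herase]
    have hlq : (xs.erase a).length = q.length := by
      have := hq.length_eq; omega
    rw [← hlq]
    exact ih hq

theorem anyComb_iff (courses : List String) (schedule : List (List String)) (b : Int) :
    (((PySem.List.combinations (PySem.List.pyRange 0 b 1) courses.length).any fun combo =>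
      (PySem.List.permutations combo combo.length).any fun assignment =>
        aCheckLoop schedule assignment (PySem.List.enumerate courses 0) PySem.Set.empty) = true)
    ↔ ∃ ts, Fits courses schedule b ts := by
  rw [List.any_eq_true]
  constructor
  · rintro ⟨combo, hcombo, hin⟩
    rw [List.any_eq_true] at hin
    obtain ⟨asg, hasg, hrun⟩ := hin
    obtain ⟨hsl, hclen⟩ := (PySem.List.mem_combinations_iff _ _ _).1 hcombo
    have hperm : asg.Perm combo := PySem.List.perm_of_mem_permutations hasg
    have halen : asg.length = courses.length := by rw [hperm.length_eq, hclen]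
    have h0 : (0 : Int) = ((0 : Nat) : Int) := by norm_num
    rw [h0, aCheckLoop_eq_chainOK schedule asg courses 0 PySem.Set.empty (by omega)] at hrun
    rw [List.drop_zero] at hrun
    obtain ⟨hnd, _, hzip⟩ := (chainOK_iff schedule courses asg PySem.Set.empty halen.symm).1 hrun
    refine ⟨asg, halen, hnd, ?_, hzip⟩
    intro x hx
    have : x ∈ PySem.List.pyRange 0 b 1 := hsl.subset (hperm.mem_iff.1 hx)
    rw [PySem.List.mem_pyRange_one] at this
    exact this
  · rintro ⟨ts, hlen, hnd, hb, hzip⟩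
    have hsubset : ts ⊆ PySem.List.pyRange 0 b 1 := by
      intro x hx
      rw [PySem.List.mem_pyRange_one]
      exact hb x hx
    set combo := (PySem.List.pyRange 0 b 1).filter (fun x => decide (x ∈ ts)) with hcombo
    have hsl : combo.Sublist (PySem.List.pyRange 0 b 1) := List.filter_sublist
    have hcnd : combo.Nodup := hsl.nodup (PySem.List.nodup_pyRange_one 0 b)
    have hperm : ts.Perm combo := by
      rw [List.perm_ext_iff_of_nodup hnd hcnd]
      intro a
      simp only [hcombo, List.mem_filter, decide_eq_true_eq]
      constructor
      · intro h; exact ⟨hsubset h, h⟩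
      · exact fun h => h.2
    have hclen : combo.length = courses.length := by rw [← hperm.length_eq, hlen]
    refine ⟨combo, (PySem.List.mem_combinations_iff _ _ _).2 ⟨hsl, hclen⟩, ?_⟩
    rw [List.any_eq_true]
    refine ⟨ts, mem_permutations_of_perm hperm, ?_⟩
    have h0 : (0 : Int) = ((0 : Nat) : Int) := by norm_num
    rw [h0, aCheckLoop_eq_chainOK schedule ts courses 0 PySem.Set.empty (by omega), List.drop_zero]
    refine (chainOK_iff schedule courses ts PySem.Set.empty hlen.symm).2 ⟨hnd, ?_, hzip⟩
    intro x _
    rw [contains_eq_false_iff]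
    simp [PySem.Set.empty]

theorem A_iff (courses : List String) (schedule : List (List String)) (grade : String) :
    (check_student_schedule courses schedule grade = true ↔
      ∃ ts, Fits courses schedule
        (if grade == "G11" then (3 : Int) else (schedule.length : Int)) ts) := by
  unfold check_student_schedule
  cases hg : (grade == "G11") with
  | false =>
    simp only [Bool.false_eq_true, if_false]
    exact anyComb_iff courses schedule (schedule.length : Int)
  | true =>
    simp only [if_true]
    exact anyComb_iff courses schedule 3

theorem bPlace_iff (slots : List (List String)) :
    ∀ (cs : List String) (used : PySem.Set Int),
    (bPlace slots cs used = true ↔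
      ∃ ts : List Int, ts.length = cs.length ∧ ts.Nodup ∧
        (∀ x ∈ ts, PySem.Set.contains used x = false ∧ 0 ≤ x ∧ x < (slots.length : Int)) ∧
        ∀ p ∈ cs.zip ts, (PySem.List.pyGetD slots p.2 []).contains p.1 = true) := by
  intro cs
  induction cs with
  | nil =>
    intro used
    simp only [bPlace]
    constructor
    · intro _; exact ⟨[], by simp⟩
    · intro _; trivial
  | cons c cs ih =>
    intro used
    simp only [bPlace, List.any_eq_true]
    constructor
    · rintro ⟨j, hj, hcond⟩
      rw [PySem.List.mem_pyRange_one] at hj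
      simp only [Bool.and_eq_true, Bool.not_eq_true'] at hcond
      obtain ⟨⟨hnotused, hmem⟩, hrec⟩ := hcond
      obtain ⟨ts, hlen, hnd, havoid, hzip⟩ := (ih (PySem.Set.add used j)).1 hrec
      refine ⟨j :: ts, by simp [hlen], ?_, ?_, ?_⟩
      · refine List.nodup_cons.2 ⟨fun hmem' => ?_, hnd⟩
        have := (havoid j hmem').1
        rw [contains_eq_false_iff, PySem.Set.mem_add] at this
        exact this (Or.inr rfl)
      · intro x hx
        rcases hx with _ | hx
        · exact ⟨hnotused, hj⟩
        · have h1 := havoid x (by assumption)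
          refine ⟨?_, h1.2⟩
          rw [contains_eq_false_iff, PySem.Set.mem_add] at h1
          rw [contains_eq_false_iff]
          exact fun hc => h1.1 (Or.inl hc)
      · intro p hp
        rcases hp with _ | hp
        · exact hmem
        · exact hzip p (by assumption)
    · rintro ⟨ts, hlen, hnd, havoid, hzip⟩
      cases ts with
      | nil => simp at hlen
      | cons t ts' =>
        have hnd' := List.nodup_cons.1 hnd
        refine ⟨t, ?_, ?_⟩
        · rw [PySem.List.mem_pyRange_one]
          exact ⟨(havoid t (by simp)).2.1, (havoid t (by simp)).2.2⟩
        · have h1 : PySem.Set.contains used t = false := (havoid t (by simp)).1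
          have h2 : (PySem.List.pyGetD slots t []).contains c = true := hzip (c, t) (by simp)
          rw [h1, h2]
          simp only [Bool.not_false, Bool.true_and, Bool.and_true]
          refine (ih (PySem.Set.add used t)).2 ⟨ts', by simpa using hlen, hnd'.2, ?_, ?_⟩
          · intro x hx
            have h3 := havoid x (by simp [hx])
            refine ⟨?_, h3.2⟩
            rw [contains_eq_false_iff, PySem.Set.mem_add]
            rintro (hc | rfl)
            · exact (contains_eq_false_iff.1 h3.1) hc
            · exact hnd'.1 hx
          · intro p hp
            exact hzip p (by simp [hp])

theorem nodup_length_le_of_range {ts : List Int} {n : Int} (h0 : 0 ≤ n) (hn : ts.Nodup)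
    (hb : ∀ x ∈ ts, 0 ≤ x ∧ x < n) : (ts.length : Int) ≤ n := by
  have hsub : ts ⊆ PySem.List.pyRange 0 n 1 := by
    intro x hx
    rw [PySem.List.mem_pyRange_one]
    exact hb x hx
  have := (hn.subperm hsub).length_le
  rw [PySem.List.length_pyRange_one] at this
  omega

theorem Balt_iff_gen (courses : List String) (slots : List (List String)) :
    ((if courses.length > slots.length then false else bPlace slots courses PySem.Set.empty) = true)
    ↔ ∃ ts, Fits courses slots (slots.length : Int) ts := by
  split
  · rename_i hgt
    constructor
    · intro h; exact absurd h (by simp)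
    · rintro ⟨ts, h1, h2, hb, _⟩
      exfalso
      have hle := nodup_length_le_of_range (n := (slots.length : Int)) (by positivity) h2 hb
      omega
  · rw [bPlace_iff]
    constructor
    · rintro ⟨ts, h1, h2, h3, h4⟩
      exact ⟨ts, h1, h2, fun x hx => (h3 x hx).2, h4⟩
    · rintro ⟨ts, h1, h2, h3, h4⟩
      refine ⟨ts, h1, h2, fun x hx => ⟨?_, h3 x hx⟩, h4⟩
      rw [contains_eq_false_iff]
      simp [PySem.Set.empty]

theorem B_iff (courses : List String) (schedule : List (List String)) (grade : String) :
    (check_student_schedule_alt courses schedule grade = true ↔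
      ∃ ts, Fits courses
        (if grade == "G11" then PySem.List.slice schedule none (some 3) else schedule)
        ((if grade == "G11" then PySem.List.slice schedule none (some 3) else schedule).length : Int) ts) :=
  Balt_iff_gen courses (if grade == "G11" then PySem.List.slice schedule none (some 3) else schedule)

theorem pyGetD_take3 {x : Int} {s : List (List String)} (h3 : 3 ≤ s.length) (h0 : 0 ≤ x) (hx : x < 3) :
    PySem.List.pyGetD (s.take 3) x [] = PySem.List.pyGetD s x [] := by
  rw [PySem.List.pyGetD_eq_getElem (s.take 3) [] h0 (by simp; omega),
      PySem.List.pyGetD_eq_getElem s [] h0 (by omega)]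
  exact List.getElem_take

-- ===== VERDICT (by name: the statement is the Claim_ definition above) =====
theorem check_student_schedule_spec : Claim_equal_check_student_schedule := by
  intro courses schedule grade _ hpre
  unfold Spec_check_student_schedule
  rw [Bool.eq_iff_iff, A_iff, B_iff]
  cases hg : (grade == "G11") with
  | false => simp only [Bool.false_eq_true, if_false]
  | true =>
    simp only [if_true]
    have hslice : PySem.List.slice schedule none (some 3) = schedule.take 3 := by
      rw [PySem.List.slice_to (xs := schedule) (b := 3) (by norm_num)]
      rfl
    rw [hslice]
    have hcases : 3 ≤ schedule.length ∨ courses.length = 0 ∨ 4 ≤ courses.length := by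
      have hnot : ¬ (schedule.length < 3 ∧ 1 ≤ courses.length ∧ courses.length ≤ 3) :=
        fun h => hpre ⟨eq_of_beq hg, h⟩
      push Not at hnot
      omega
    rcases hcases with h3 | h0 | h4
    · have hlen3 : ((schedule.take 3).length : Int) = 3 := by simp; omega
      rw [hlen3]
      constructor
      · rintro ⟨ts, h1, h2, hb, hz⟩
        refine ⟨ts, h1, h2, hb, fun p hp => ?_⟩
        obtain ⟨a, b⟩ := p
        have hmem : b ∈ ts := (List.of_mem_zip hp).2
        rw [pyGetD_take3 h3 (hb b hmem).1 (hb b hmem).2]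
        exact hz _ hp
      · rintro ⟨ts, h1, h2, hb, hz⟩
        refine ⟨ts, h1, h2, hb, fun p hp => ?_⟩
        obtain ⟨a, b⟩ := p
        have hmem : b ∈ ts := (List.of_mem_zip hp).2
        rw [← pyGetD_take3 h3 (hb b hmem).1 (hb b hmem).2]
        exact hz _ hp
    · have : courses = [] := List.length_eq_zero_iff.1 h0
      subst this
      refine iff_of_true ⟨[], by simp [Fits]⟩ ⟨[], by simp [Fits]⟩
    · refine iff_of_false ?_ ?_
      · rintro ⟨ts, h1, h2, hb, _⟩
        have := nodup_length_le_of_range (by norm_num) h2 hb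
        omega
      · rintro ⟨ts, h1, h2, hb, _⟩
        have hle := nodup_length_le_of_range (n := ((schedule.take 3).length : Int)) (by positivity) h2 hb
        have : (schedule.take 3).length ≤ 3 := by simp
        omega
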